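-- pv_equiv track=rewrite | github.com/maikyonn/rfs-scenario-gen | generator/compute_crossing_pairs.py | _is_validated
-- ===== SOURCE A (Python) =====
-- VALIDATED_PAIRS = {
--     (323, 52, 19, 44, 20),
--     (199, 28, 25, 39, 54),
--     (103, 24, 12, 40, 37),
-- }
--
-- def _is_validated(junction_id, road_a, exit_a, road_b, exit_b):
--     """Check if this pair matches one of the known validated pairs."""
--     for vj, vra, vea, vrb, veb in VALIDATED_PAIRS:
--         if junction_id != vj:
--             continue
--         # Check both orderings
--         if (road_a == vra and exit_a == vea and road_b == vrb and exit_b == veb):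
--             return True
--         if (road_a == vrb and exit_a == veb and road_b == vra and exit_b == vea):
--             return True
--     return False
-- ===== SOURCE B (Python) =====
-- VALIDATED_PAIRS = {
--     (323, 52, 19, 44, 20),
--     (199, 28, 25, 39, 54),
--     (103, 24, 12, 40, 37),
-- }
--
-- # Canonical index built once: each validated pair stored with its two
-- # (road, exit) legs sorted, so orientation never has to be checked at query time.
-- _CANONICAL = {(j, tuple(sorted(((ra, ea), (rb, eb)))))
--               for j, ra, ea, rb, eb in VALIDATED_PAIRS}
--
--
-- def _is_validated(junction_id, road_a, exit_a, road_b, exit_b):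
--     """Check if this pair matches one of the known validated pairs."""
--     legs = tuple(sorted(((road_a, exit_a), (road_b, exit_b))))
--     return (junction_id, legs) in _CANONICAL
-- ===== Notes on version B (the rewrite author's own statement) =====
-- stated objective: alternative
-- what changed: Replaces A's loop over raw pairs with orientation checks by a canonicalization scheme: a set of canonical forms (junction, sorted (road,exit) legs) is precomputed once, and the query canonicalizes its own legs and does a single membership test, so no per-entry orientation comparison exists at query time.
import Mathlib
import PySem

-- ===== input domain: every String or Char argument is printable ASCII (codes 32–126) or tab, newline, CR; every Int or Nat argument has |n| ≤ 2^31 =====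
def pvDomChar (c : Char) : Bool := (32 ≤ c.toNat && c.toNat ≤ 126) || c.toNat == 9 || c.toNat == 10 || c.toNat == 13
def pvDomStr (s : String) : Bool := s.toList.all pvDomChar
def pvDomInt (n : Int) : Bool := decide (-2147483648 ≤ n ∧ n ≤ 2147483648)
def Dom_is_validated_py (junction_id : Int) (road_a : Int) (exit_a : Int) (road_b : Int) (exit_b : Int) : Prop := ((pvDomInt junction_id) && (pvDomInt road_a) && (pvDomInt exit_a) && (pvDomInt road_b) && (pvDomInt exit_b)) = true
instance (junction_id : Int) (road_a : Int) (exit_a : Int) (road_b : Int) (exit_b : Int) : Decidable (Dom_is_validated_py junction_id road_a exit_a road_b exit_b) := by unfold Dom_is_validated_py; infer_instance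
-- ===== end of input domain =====

-- B canonicalizes the two (road, exit) legs by sorting them and tests one membership in a
-- precomputed set of canonical forms, instead of A's loop with per-entry orientation checks.
-- ===== PORT A =====
-- the module-level set VALIDATED_PAIRS, as a PySem set of distinct tuples (insertion = source order)
def validatedPairs : PySem.Set (Int × Int × Int × Int × Int) :=
  PySem.Set.ofList [(323, 52, 19, 44, 20), (199, 28, 25, 39, 54), (103, 24, 12, 40, 37)]

-- A's for-loop with continue / early return, as structural recursion over the set's elements
def isValidatedLoop (junction_id road_a exit_a road_b exit_b : Int) :
    List (Int × Int × Int × Int × Int) → Bool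
  | [] => false
  | (vj, vra, vea, vrb, veb) :: rest =>
    if junction_id ≠ vj then
      isValidatedLoop junction_id road_a exit_a road_b exit_b rest
    else if road_a = vra ∧ exit_a = vea ∧ road_b = vrb ∧ exit_b = veb then
      true
    else if road_a = vrb ∧ exit_a = veb ∧ road_b = vra ∧ exit_b = vea then
      true
    else
      isValidatedLoop junction_id road_a exit_a road_b exit_b rest

def is_validated_py (junction_id : Int) (road_a : Int) (exit_a : Int) (road_b : Int) (exit_b : Int) : Bool :=
  isValidatedLoop junction_id road_a exit_a road_b exit_b validatedPairs

-- ===== PORT B =====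
-- tuple(sorted((p, q))) for exactly two pairs: Python's lexicographic tuple order
def sortLegs (p q : Int × Int) : (Int × Int) × (Int × Int) :=
  if q.1 < p.1 ∨ (q.1 = p.1 ∧ q.2 < p.2) then (q, p) else (p, q)

-- the precomputed canonical set _CANONICAL (set comprehension over VALIDATED_PAIRS)
def canonicalSet : PySem.Set (Int × ((Int × Int) × (Int × Int))) :=
  PySem.Set.ofList (([(323, 52, 19, 44, 20), (199, 28, 25, 39, 54), (103, 24, 12, 40, 37)] :
      List (Int × Int × Int × Int × Int)).map
    (fun x => (x.1, sortLegs (x.2.1, x.2.2.1) (x.2.2.2.1, x.2.2.2.2))))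

def is_validated_py_alt (junction_id : Int) (road_a : Int) (exit_a : Int) (road_b : Int) (exit_b : Int) : Bool :=
  ((junction_id, sortLegs (road_a, exit_a) (road_b, exit_b)) ∈ canonicalSet : Bool)

-- ===== PRECONDITION & SPEC =====
def Spec_is_validated_py (junction_id : Int) (road_a : Int) (exit_a : Int) (road_b : Int) (exit_b : Int) (out : Bool) : Prop := out = is_validated_py_alt junction_id road_a exit_a road_b exit_b
instance (junction_id : Int) (road_a : Int) (exit_a : Int) (road_b : Int) (exit_b : Int) (out : Bool) : Decidable (Spec_is_validated_py junction_id road_a exit_a road_b exit_b out) := by unfold Spec_is_validated_py; infer_instance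

-- ===== CLAIM (what is proved, stated in full; the proofs are below) =====
def Claim_equal_is_validated_py : Prop := ∀ (junction_id : Int) (road_a : Int) (exit_a : Int) (road_b : Int) (exit_b : Int), Dom_is_validated_py junction_id road_a exit_a road_b exit_b → Spec_is_validated_py junction_id road_a exit_a road_b exit_b (is_validated_py junction_id road_a exit_a road_b exit_b)

-- ===== LEMMAS AND PROOFS =====

-- ===== VERDICT (by name: the statement is the Claim_ definition above) =====
theorem is_validated_py_spec : Claim_equal_is_validated_py := by
  intro j ra ea rb eb _
  unfold Spec_is_validated_py is_validated_py is_validated_py_alt validatedPairs canonicalSet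
  simp only [List.map, PySem.Set.ofList, PySem.Set.add, PySem.Set.empty, List.foldl]
  norm_num [isValidatedLoop, sortLegs, List.mem_cons, List.not_mem_nil, Prod.ext_iff]
  split_ifs <;> simp_all <;> rw [Bool.eq_iff_iff] <;> simp <;> omega
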